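-- pv_equiv track=rewrite | github.com/niklasr22/AoC | 2023/day21b_arrrhrgh.py | grid_copy
-- ===== SOURCE A (Python) =====
-- def grid_copy(grid, copies):
--     new_grid = []
--
--     for y_c in range(copies):
--         for y in range(len(grid)):
--             new_grid.append(grid[y] * copies)
--
--     grid_txt = "\n".join(new_grid)
--     grid_txt = grid_txt.replace("S", ".", (copies * copies) // 2)
--     grid_txt = grid_txt[: grid_txt.find("S") + 1] + grid_txt[
--         grid_txt.find("S") + 1 :
--     ].replace("S", ".")
--
--     return grid_txt.splitlines()
-- ===== SOURCE B (Python) =====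
-- def grid_copy(grid, copies):
--     text = "\n".join([row * copies for row in grid] * copies)
--     target = (copies * copies) // 2
--     out = []
--     seen = 0
--     for ch in text:
--         if ch == "S":
--             out.append("S" if seen == target else ".")
--             seen += 1
--         else:
--             out.append(ch)
--     return "".join(out).splitlines()
-- ===== Notes on version B (the rewrite author's own statement) =====
-- stated objective: simpler
-- what changed: Tiling is built by list/string multiplication instead of nested index loops, and A's three-step string surgery (bounded replace, find, slice-and-replace) is replaced by one left-to-right pass over the text with a running counter of S occurrences that keeps only the S whose 0-based occurrence index is (copies*copies)//2.
import Mathlib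
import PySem

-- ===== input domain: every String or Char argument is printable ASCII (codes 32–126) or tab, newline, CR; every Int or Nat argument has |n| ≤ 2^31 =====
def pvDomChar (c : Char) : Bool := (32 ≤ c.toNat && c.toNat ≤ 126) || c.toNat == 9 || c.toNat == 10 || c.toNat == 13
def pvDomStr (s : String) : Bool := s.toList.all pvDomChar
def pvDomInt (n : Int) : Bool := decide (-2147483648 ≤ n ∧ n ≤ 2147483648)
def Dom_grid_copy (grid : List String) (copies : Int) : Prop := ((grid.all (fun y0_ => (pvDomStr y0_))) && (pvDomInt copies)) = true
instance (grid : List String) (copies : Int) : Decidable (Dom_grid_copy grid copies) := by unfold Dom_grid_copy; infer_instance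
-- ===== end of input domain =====

-- B replaces A's three-step string surgery (bounded replace, find, slice + replace) by ONE
-- left-to-right pass with a running counter of S occurrences, keeping only the S whose
-- occurrence index is (copies*copies)//2; objective: simpler (same asymptotic cost).

-- ===== PORT A =====

-- hand port of Python's 'str * int' (repetition; empty for non-positive counts) — exact
def strMul (cs : List Char) (n : Int) : List Char := (List.replicate n.toNat cs).flatten

-- hand port of Python's str.replace(old, new, count) for the 1-char pattern "S" → "." — exact,
-- since a 1-char pattern never overlaps: replaces occurrences left to right while count ≠ 0
def charsReplaceN : List Char → Int → List Char
  | [], _ => []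
  | c :: t, k => if c = 'S' ∧ k ≠ 0 then '.' :: charsReplaceN t (k - 1) else c :: charsReplaceN t k

def grid_copy (grid : List String) (copies : Int) : List String :=
  let newGrid : List (List Char) :=
    (PySem.List.pyRange 0 copies 1).foldl (fun acc _ =>
      (PySem.List.pyRange 0 (PySem.List.len grid) 1).foldl (fun acc2 y =>
        acc2 ++ [strMul (PySem.List.pyGetD grid y "").toList copies]) acc) []
  let t0 := PySem.Chars.join ['\n'] newGrid
  let t1 := charsReplaceN t0 (PySem.Int.floordiv (copies * copies) 2)
  let i := PySem.Chars.find t1 ['S']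
  let t2 := PySem.Chars.slice t1 none (some (i + 1)) ++
      PySem.Chars.replace (PySem.Chars.slice t1 (some (i + 1)) none) ['S'] ['.']
  (PySem.Chars.splitlines t2).map String.ofList

-- ===== PORT B =====

-- hand port of Python's 'list * int' (repetition; empty for non-positive counts) — exact
def listMul {α : Type} (xs : List α) (n : Int) : List α := (List.replicate n.toNat xs).flatten

def grid_copy_alt (grid : List String) (copies : Int) : List String :=
  let text := PySem.Chars.join ['\n'] (listMul (grid.map (fun row => strMul row.toList copies)) copies)
  let target := PySem.Int.floordiv (copies * copies) 2
  -- B's for-loop over the characters: state = (out, seen)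
  let st := text.foldl (fun (st : List Char × Int) ch =>
      if ch = 'S' then (st.1 ++ [if st.2 = target then 'S' else '.'], st.2 + 1)
      else (st.1 ++ [ch], st.2)) ([], 0)
  (PySem.Chars.splitlines st.1).map String.ofList

-- ===== PRECONDITION & SPEC =====
def Spec_grid_copy (grid : List String) (copies : Int) (out : List String) : Prop := out = grid_copy_alt grid copies
instance (grid : List String) (copies : Int) (out : List String) : Decidable (Spec_grid_copy grid copies out) := by unfold Spec_grid_copy; infer_instance

-- ===== CLAIM (what is proved, stated in full; the proofs are below) =====
def Claim_equal_grid_copy : Prop := ∀ (grid : List String) (copies : Int), Dom_grid_copy grid copies → Spec_grid_copy grid copies (grid_copy grid copies)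

-- ===== LEMMAS AND PROOFS =====

-- the per-S-occurrence view of the text transformation: S number `seen` stays iff seen = target
def passS : List Char → Int → Int → List Char
  | [], _, _ => []
  | c :: t, seen, target =>
      if c = 'S' then (if seen = target then 'S' else '.') :: passS t (seen + 1) target
      else c :: passS t seen target

-- replace all S with . (what PySem.Chars.replace computes for this pattern), structurally
def repAll : List Char → List Char
  | [] => []
  | c :: t => (if c = 'S' then '.' else c) :: repAll t

theorem repAll_cons (c : Char) (t : List Char) :
    repAll (c :: t) = (if c = 'S' then '.' else c) :: repAll t := rfl

theorem passS_cons (c : Char) (t : List Char) (seen target : Int) :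
    passS (c :: t) seen target =
      if c = 'S' then (if seen = target then 'S' else '.') :: passS t (seen + 1) target
      else c :: passS t seen target := rfl

theorem charsReplaceN_cons (c : Char) (t : List Char) (k : Int) :
    charsReplaceN (c :: t) k =
      if c = 'S' ∧ k ≠ 0 then '.' :: charsReplaceN t (k - 1) else c :: charsReplaceN t k := rfl

theorem replaceGo_eq_repAll (t : List Char) : ∀ (fuel : Nat) (acc : List Char),
    t.length ≤ fuel → PySem.Chars.replace.go ['S'] ['.'] fuel t acc = acc.reverse ++ repAll t := by
  induction t with
  | nil => intro fuel acc h; cases fuel <;> simp [PySem.Chars.replace.go, repAll]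
  | cons c t ih =>
    intro fuel acc h
    cases fuel with
    | zero => simp at h
    | succ f =>
      simp only [PySem.Chars.replace.go, repAll]
      by_cases hc : c = 'S'
      · subst hc
        have hp : List.isPrefixOf ['S'] ('S' :: t) = true := by simp [List.isPrefixOf]
        rw [if_pos hp]
        simp only [List.length_cons] at h
        rw [show (List.drop ['S'].length ('S' :: t)) = t from rfl,
          show (['.'].reverse ++ acc) = '.' :: acc from rfl,
          ih f ('.' :: acc) (by omega)]
        simp
      · have hp : ¬ List.isPrefixOf ['S'] (c :: t) = true := by
          simp [List.isPrefixOf]; intro h'; exact hc h'.symm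
        rw [if_neg hp]
        simp only [List.length_cons] at h
        rw [ih f (c :: acc) (by omega)]
        simp [hc]

theorem replace_eq_repAll (t : List Char) : PySem.Chars.replace t ['S'] ['.'] = repAll t := by
  have := replaceGo_eq_repAll t t.length [] (le_refl _)
  simpa [PySem.Chars.replace] using this

theorem find_nonneg_of_ne (t : List Char) (h : PySem.Chars.find t ['S'] ≠ -1) :
    0 ≤ PySem.Chars.find t ['S'] := by
  unfold PySem.Chars.find
  unfold PySem.Chars.find at h
  generalize hk : (0 : Nat) = k at *
  clear hk
  induction t generalizing k with
  | nil => simp [PySem.Chars.find.go] at h ⊢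
  | cons c t ih =>
    simp only [PySem.Chars.find.go] at h ⊢
    by_cases hp : List.isPrefixOf ['S'] (c :: t) = true
    · rw [if_pos hp] at h ⊢; omega
    · rw [if_neg hp] at h ⊢; exact ih _ h

theorem find_cons_S (t : List Char) : PySem.Chars.find ('S' :: t) ['S'] = 0 := by
  have hp : List.isPrefixOf ['S'] ('S' :: t) = true := by simp [List.isPrefixOf]
  simp [PySem.Chars.find, PySem.Chars.find.go, hp]

theorem findGo_shift (t : List Char) : ∀ (k : Nat),
    PySem.Chars.find.go ['S'] t k =
      if PySem.Chars.find t ['S'] = -1 then -1 else PySem.Chars.find t ['S'] + k := by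
  induction t with
  | nil => intro k; simp [PySem.Chars.find, PySem.Chars.find.go]
  | cons c t ih =>
    intro k
    by_cases hc : c = 'S'
    · subst hc
      have hp : List.isPrefixOf ['S'] ('S' :: t) = true := by simp [List.isPrefixOf]
      simp [PySem.Chars.find, PySem.Chars.find.go, hp]
    · have hp : ¬ List.isPrefixOf ['S'] (c :: t) = true := by
        simp [List.isPrefixOf]; intro h'; exact hc h'.symm
      have e0 : PySem.Chars.find.go ['S'] (c :: t) k = PySem.Chars.find.go ['S'] t (k + 1) := by
        simp [PySem.Chars.find.go, hp]
      have e1 : PySem.Chars.find (c :: t) ['S'] = PySem.Chars.find.go ['S'] t 1 := by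
        simp [PySem.Chars.find, PySem.Chars.find.go, hp]
      rw [e0, e1, ih (k + 1), ih 1]
      by_cases h0 : PySem.Chars.find t ['S'] = -1
      · simp [h0]
      · have hnn : 0 ≤ PySem.Chars.find t ['S'] := find_nonneg_of_ne t h0
        rw [if_neg h0, if_neg h0, if_neg (by omega : ¬ PySem.Chars.find t ['S'] + (1 : Nat) = -1)]
        push_cast
        ring

theorem find_cons_ne (c : Char) (t : List Char) (hc : c ≠ 'S') :
    PySem.Chars.find (c :: t) ['S'] =
      if PySem.Chars.find t ['S'] = -1 then -1 else PySem.Chars.find t ['S'] + 1 := by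
  have hp : ¬ List.isPrefixOf ['S'] (c :: t) = true := by
    simp [List.isPrefixOf]; intro h'; exact hc h'.symm
  have e1 : PySem.Chars.find (c :: t) ['S'] = PySem.Chars.find.go ['S'] t 1 := by
    simp [PySem.Chars.find, PySem.Chars.find.go, hp]
  rw [e1, findGo_shift t 1]
  norm_num

-- A's find/slice/replace step, as a function of the already-count-replaced text
def Fstep (t1 : List Char) : List Char :=
  PySem.Chars.slice t1 none (some (PySem.Chars.find t1 ['S'] + 1)) ++
    repAll (PySem.Chars.slice t1 (some (PySem.Chars.find t1 ['S'] + 1)) none)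

theorem Fstep_nil : Fstep [] = [] := by
  simp [Fstep, PySem.Chars.find, PySem.Chars.find.go, PySem.List.slice, repAll]

theorem Fstep_cons_S (t : List Char) : Fstep ('S' :: t) = 'S' :: repAll t := by
  unfold Fstep
  rw [find_cons_S]
  rw [show ((0 : Int) + 1) = ((1 : Nat) : Int) by norm_num]
  rw [PySem.Chars.slice_eq_listSlice, PySem.Chars.slice_eq_listSlice,
    PySem.List.slice_to_natCast, PySem.List.slice_from_natCast]
  simp

theorem Fstep_cons_ne (c : Char) (t : List Char) (hc : c ≠ 'S') :
    Fstep (c :: t) = c :: Fstep t := by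
  unfold Fstep
  rw [find_cons_ne c t hc]
  by_cases h : PySem.Chars.find t ['S'] = -1
  · rw [if_pos h, h]
    rw [show ((-1 : Int) + 1) = ((0 : Nat) : Int) by norm_num]
    rw [PySem.Chars.slice_eq_listSlice, PySem.Chars.slice_eq_listSlice,
      PySem.Chars.slice_eq_listSlice, PySem.Chars.slice_eq_listSlice,
      PySem.List.slice_to_natCast, PySem.List.slice_from_natCast,
      PySem.List.slice_to_natCast, PySem.List.slice_from_natCast]
    simp [repAll_cons, hc]
  · rw [if_neg h]
    have h0 : 0 ≤ PySem.Chars.find t ['S'] := find_nonneg_of_ne t h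
    obtain ⟨m, hm⟩ : ∃ m : Nat, PySem.Chars.find t ['S'] = (m : Int) :=
      ⟨(PySem.Chars.find t ['S']).toNat, by omega⟩
    rw [hm]
    rw [show ((m : Int) + 1 + 1) = (((m + 2 : Nat)) : Int) by push_cast; ring]
    rw [show ((m : Int) + 1) = (((m + 1 : Nat)) : Int) by push_cast; ring]
    rw [PySem.Chars.slice_eq_listSlice, PySem.Chars.slice_eq_listSlice,
      PySem.Chars.slice_eq_listSlice, PySem.Chars.slice_eq_listSlice,
      PySem.List.slice_to_natCast, PySem.List.slice_from_natCast,
      PySem.List.slice_to_natCast, PySem.List.slice_from_natCast]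
    simp [List.take_succ_cons, List.drop_succ_cons]

theorem passS_shift (t : List Char) : ∀ (s k : Int), passS t (s + 1) (k + 1) = passS t s k := by
  induction t with
  | nil => intro s k; simp [passS]
  | cons c t ih =>
    intro s k
    rw [passS_cons, passS_cons]
    by_cases hc : c = 'S'
    · rw [if_pos hc, if_pos hc]
      rw [show (s + 1 + 1 : Int) = (s + 1) + 1 by ring, ih (s + 1) k]
      by_cases h : s = k
      · rw [if_pos (by omega : (s + 1 : Int) = k + 1), if_pos h]
      · rw [if_neg (by omega : ¬ (s + 1 : Int) = k + 1), if_neg h]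
    · rw [if_neg hc, if_neg hc, ih s k]

theorem passS_all (t : List Char) : ∀ (s k : Int), k < s → passS t s k = repAll t := by
  induction t with
  | nil => intro s k _; simp [passS, repAll]
  | cons c t ih =>
    intro s k h
    rw [passS_cons, repAll_cons]
    by_cases hc : c = 'S'
    · rw [if_pos hc, if_pos hc, if_neg (by omega : ¬ s = k), ih (s + 1) k (by omega)]
    · rw [if_neg hc, if_neg hc, ih s k h]

theorem charsReplaceN_zero (t : List Char) : charsReplaceN t 0 = t := by
  induction t with
  | nil => rfl
  | cons c t ih =>
    rw [charsReplaceN_cons, if_neg (by simp), ih]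

-- main core lemma: A's surgery on the count-replaced text = the counter pass
theorem core_eq (t : List Char) : ∀ (k : Int), 0 ≤ k →
    Fstep (charsReplaceN t k) = passS t 0 k := by
  induction t with
  | nil => intro k _; simp [charsReplaceN, passS, Fstep_nil]
  | cons c t ih =>
    intro k hk
    rw [charsReplaceN_cons, passS_cons]
    by_cases hc : c = 'S'
    · rw [if_pos hc]
      by_cases h0 : k = 0
      · subst h0
        rw [if_neg (by simp), hc, charsReplaceN_zero, Fstep_cons_S,
          if_pos rfl, passS_all t (0 + 1) 0 (by omega)]
      · have hs : passS t (0 + 1) k = passS t 0 (k - 1) := by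
          have := passS_shift t 0 (k - 1)
          rw [show (k - 1 + 1 : Int) = k by ring] at this
          exact this
        rw [if_pos ⟨hc, h0⟩, Fstep_cons_ne '.' _ (by decide), ih (k - 1) (by omega),
          if_neg (by omega : ¬ (0 : Int) = k), hs]
    · rw [if_neg (fun h => hc h.1), if_neg hc, Fstep_cons_ne c _ hc, ih k hk]

-- A's nested tiling loops build exactly B's repeated block
theorem tiling_eq (grid : List String) (copies : Int) :
    (PySem.List.pyRange 0 copies 1).foldl (fun acc _ =>
      (PySem.List.pyRange 0 (PySem.List.len grid) 1).foldl (fun acc2 y =>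
        acc2 ++ [strMul (PySem.List.pyGetD grid y "").toList copies]) acc) [] =
    listMul (grid.map (fun row => strMul row.toList copies)) copies := by
  have hinner : ∀ acc : List (List Char),
      (PySem.List.pyRange 0 (PySem.List.len grid) 1).foldl (fun acc2 y =>
        acc2 ++ [strMul (PySem.List.pyGetD grid y "").toList copies]) acc =
      acc ++ grid.map (fun row => strMul row.toList copies) := by
    intro acc
    rw [PySem.List.foldl_pyRange_zero_pyGetD grid "" (fun acc2 (s : String) => acc2 ++ [strMul s.toList copies]) acc]
    exact PySem.List.foldl_append_singleton_eq_map (fun (s : String) => strMul s.toList copies) grid acc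
  simp only [hinner]
  unfold listMul
  rw [PySem.List.pyRange_one]
  simp only [Int.sub_zero]
  generalize copies.toNat = n
  induction n with
  | zero => simp
  | succ m ihm =>
    rw [List.range_succ, List.map_append, List.foldl_append, ihm, List.replicate_succ']
    simp

-- B's fold with (out, seen) state, related to the structural counter pass
theorem bfold_eq_passS (target : Int) (t : List Char) : ∀ (acc : List Char) (seen : Int),
    (t.foldl (fun (st : List Char × Int) ch =>
      if ch = 'S' then (st.1 ++ [if st.2 = target then 'S' else '.'], st.2 + 1)
      else (st.1 ++ [ch], st.2)) (acc, seen)).1 = acc ++ passS t seen target := by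
  induction t with
  | nil => intro acc seen; simp [passS]
  | cons c t ih =>
    intro acc seen
    rw [List.foldl_cons, passS_cons]
    by_cases hc : c = 'S'
    · rw [if_pos hc, if_pos hc]
      simp only
      rw [ih, List.append_assoc]
      rfl
    · rw [if_neg hc, if_neg hc]
      simp only
      rw [ih, List.append_assoc]
      rfl

-- ===== VERDICT (by name: the statement is the Claim_ definition above) =====
theorem grid_copy_spec : Claim_equal_grid_copy := by
  intro grid copies _
  unfold Spec_grid_copy grid_copy grid_copy_alt
  dsimp only
  rw [tiling_eq]
  have hk : 0 ≤ PySem.Int.floordiv (copies * copies) 2 := by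
    rw [PySem.Int.floordiv_eq_ediv_of_pos (by omega)]
    exact Int.ediv_nonneg (mul_self_nonneg copies) (by omega)
  set text := PySem.Chars.join ['\n'] (listMul (grid.map (fun row => strMul row.toList copies)) copies) with htext
  have hcore := core_eq text (PySem.Int.floordiv (copies * copies) 2) hk
  simp only [Fstep] at hcore
  rw [replace_eq_repAll] at *
  rw [hcore, bfold_eq_passS]
  simp
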